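-- pv_equiv track=rewrite | github.com/pockerman/hmmtuf_docker | app/compute_engine/src/cpf.py | map_seq_to_category
-- ===== SOURCE A (Python) =====
-- def map_seq_to_category(category, seq):
--     """
--     project the original seq into
--     the given category
--     """
--
--     new_seq = ''
--     g1 = category[list(category.keys())[0]]
--     g2 = category[list(category.keys())[1]]
--
--     for base in seq:
--
--         if base in g1:
--             new_seq += list(category.keys())[0]
--         elif base in g2:
--             new_seq += list(category.keys())[1]
--         else:
--             raise ValueError("base {0} not in {1} or in {2}".format(base, g1, g2))
--     return new_seq
-- ===== SOURCE B (Python) =====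
-- def map_seq_to_category(category, seq):
--     """
--     project the original seq into
--     the given category
--     """
--     keys = list(category.keys())
--     g1 = category[keys[0]]
--     g2 = category[keys[1]]
--
--     def cat_of(base):
--         if base in g1:
--             return keys[0]
--         if base in g2:
--             return keys[1]
--         raise ValueError("base {0} not in {1} or in {2}".format(base, g1, g2))
--
--     # run-length strategy: scan maximal runs of consecutive bases that map to
--     # the same category key and emit key * run_length per run
--     parts = []
--     i, n = 0, len(seq)
--     while i < n:
--         k = cat_of(seq[i])
--         j = i + 1
--         while j < n and cat_of(seq[j]) == k:
--             j += 1
--         parts.append(k * (j - i))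
--         i = j
--     return ''.join(parts)
-- ===== Notes on version B (the rewrite author's own statement) =====
-- stated objective: alternative
-- what changed: B is a run-length algorithm: an outer index loop finds each maximal run of consecutive bases classified to the same category key and emits key * run_length per run (joined at the end), instead of A's single per-character loop that appends one key per base with string +=.
import Mathlib
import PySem

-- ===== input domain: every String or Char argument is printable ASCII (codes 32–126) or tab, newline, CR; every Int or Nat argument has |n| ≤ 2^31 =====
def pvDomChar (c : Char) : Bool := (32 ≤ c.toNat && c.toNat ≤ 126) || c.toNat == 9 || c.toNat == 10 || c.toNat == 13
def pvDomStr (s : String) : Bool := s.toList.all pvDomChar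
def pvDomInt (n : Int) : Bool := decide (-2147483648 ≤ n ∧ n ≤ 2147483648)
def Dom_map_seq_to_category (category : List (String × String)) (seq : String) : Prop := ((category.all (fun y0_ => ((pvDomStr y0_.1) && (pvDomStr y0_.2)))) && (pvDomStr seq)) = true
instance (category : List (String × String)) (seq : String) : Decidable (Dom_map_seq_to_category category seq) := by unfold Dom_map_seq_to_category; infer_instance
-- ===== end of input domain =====

-- B is a run-length re-implementation: it scans maximal runs of consecutive bases with the
-- same category key and emits key * run_length per run (alternative decomposition; same
-- return value everywhere A returns).

-- ===== PORT A =====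
def map_seq_to_category (category : List (String × String)) (seq : String) : String :=
  let d := PySem.Dict.ofList category
  let g1 := d.getD (PySem.List.pyGetD d.keys 0 "") ""
  let g2 := d.getD (PySem.List.pyGetD d.keys 1 "") ""
  -- the loop; Option accumulator: none = the ValueError branch was hit (excluded by Pre_)
  let r := seq.toList.foldl (fun (acc : Option (List Char)) base =>
      acc.bind fun a =>
        if PySem.Chars.isIn [base] g1.toList then
          some (a ++ (PySem.List.pyGetD d.keys 0 "").toList)
        else if PySem.Chars.isIn [base] g2.toList then
          some (a ++ (PySem.List.pyGetD d.keys 1 "").toList)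
        else none) (some [])
  String.ofList (r.getD [])

-- ===== PORT B =====
-- cat_of of Source B: the key of base, none = the ValueError (excluded by Pre_)
def pvCatOf (g1 g2 : List Char) (k1 k2 : String) (base : Char) : Option String :=
  if PySem.Chars.isIn [base] g1 then some k1
  else if PySem.Chars.isIn [base] g2 then some k2
  else none

-- the outer while loop of Source B: one iteration per maximal run, emitting key * run_length
def pvRuns (catOf : Char → Option String) : List Char → Option (List Char)
  | [] => some []
  | c :: rest =>
    match catOf c with
    | none => none
    | some k =>
        match pvRuns catOf (rest.dropWhile (fun c' => catOf c' == some k)) with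
        | none => none
        | some out =>
            some ((List.replicate ((rest.takeWhile (fun c' => catOf c' == some k)).length + 1) k.toList).flatten ++ out)
  termination_by l => l.length
  decreasing_by
    simp only [List.length_cons]
    exact Nat.lt_succ_of_le (List.length_dropWhile_le _ _)

def map_seq_to_category_alt (category : List (String × String)) (seq : String) : String :=
  let d := PySem.Dict.ofList category
  let keys := d.keys
  let g1 := d.getD (PySem.List.pyGetD keys 0 "") ""
  let g2 := d.getD (PySem.List.pyGetD keys 1 "") ""
  let catOf := pvCatOf g1.toList g2.toList (PySem.List.pyGetD keys 0 "") (PySem.List.pyGetD keys 1 "")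
  String.ofList ((pvRuns catOf seq.toList).getD [])

-- ===== PRECONDITION & SPEC =====
-- Pre_ excludes exactly the inputs where A raises: fewer than two dict keys (IndexError)
-- or a seq character outside both groups (ValueError).
def Pre_map_seq_to_category (category : List (String × String)) (seq : String) : Prop :=
  let d := PySem.Dict.ofList category
  let g1 := d.getD (PySem.List.pyGetD d.keys 0 "") ""
  let g2 := d.getD (PySem.List.pyGetD d.keys 1 "") ""
  2 ≤ d.keys.length ∧
    (seq.toList.all fun c => g1.toList.contains c || g2.toList.contains c) = true
instance (category : List (String × String)) (seq : String) : Decidable (Pre_map_seq_to_category category seq) := by unfold Pre_map_seq_to_category; infer_instance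

def pvWitness_map_seq_to_category : (List (String × String)) × String := ([("A", "ab"), ("B", "cd")], "abc")

def Spec_map_seq_to_category (category : List (String × String)) (seq : String) (out : String) : Prop := out = map_seq_to_category_alt category seq
instance (category : List (String × String)) (seq : String) (out : String) : Decidable (Spec_map_seq_to_category category seq out) := by unfold Spec_map_seq_to_category; infer_instance

-- ===== CLAIM (what is proved, stated in full; the proofs are below) =====
def Claim_equal_map_seq_to_category : Prop := ∀ (category : List (String × String)) (seq : String), Dom_map_seq_to_category category seq → Pre_map_seq_to_category category seq → Spec_map_seq_to_category category seq (map_seq_to_category category seq)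

-- ===== LEMMAS AND PROOFS =====

-- canonical per-character mapping both ports are reduced to
def pvMapF (catOf : Char → Option String) : List Char → Option (List Char)
  | [] => some []
  | c :: t => (catOf c).bind fun k => (pvMapF catOf t).map (fun o => k.toList ++ o)

theorem foldl_none (catOf : Char → Option String) (l : List Char) :
    l.foldl (fun (acc : Option (List Char)) base =>
      acc.bind fun a => (catOf base).map (fun k => a ++ k.toList)) none = none := by
  induction l with
  | nil => rfl
  | cons c t ih => simpa using ih

theorem foldlA (catOf : Char → Option String) :
    ∀ (l : List Char) (a : List Char),
      l.foldl (fun (acc : Option (List Char)) base =>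
        acc.bind fun x => (catOf base).map (fun k => x ++ k.toList)) (some a)
        = (pvMapF catOf l).map (fun o => a ++ o) := by
  intro l
  induction l with
  | nil => intro a; simp [pvMapF]
  | cons c t ih =>
      intro a
      simp only [List.foldl_cons, Option.bind_some, pvMapF]
      cases h : catOf c with
      | none => simp [foldl_none]
      | some k =>
          simp only [Option.map_some]
          rw [ih]
          cases pvMapF catOf t <;> simp

theorem run_emit (catOf : Char → Option String) (k : String) :
    ∀ (run : List Char), (∀ c ∈ run, catOf c = some k) → ∀ tail,
      pvMapF catOf (run ++ tail)
        = (pvMapF catOf tail).map (fun o => (List.replicate run.length k.toList).flatten ++ o) := by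
  intro run
  induction run with
  | nil =>
      intro _ tail
      simp only [List.nil_append, List.length_nil, List.replicate_zero, List.flatten_nil]
      cases pvMapF catOf tail <;> simp
  | cons c r ih =>
      intro h tail
      have hc : catOf c = some k := h c (List.mem_cons_self ..)
      have hr := ih (fun c' hc' => h c' (List.mem_cons_of_mem _ hc')) tail
      simp only [List.cons_append, pvMapF, hc, Option.bind_some, hr]
      cases pvMapF catOf tail <;> simp [List.replicate_succ]

theorem runs_eq (catOf : Char → Option String) :
    ∀ (n : ℕ) (l : List Char), l.length ≤ n → pvRuns catOf l = pvMapF catOf l := by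
  intro n
  induction n with
  | zero =>
      intro l hl
      have : l = [] := List.eq_nil_of_length_eq_zero (Nat.le_zero.mp hl)
      subst this; simp [pvRuns, pvMapF]
  | succ n ih =>
      intro l hl
      cases l with
      | nil => simp [pvRuns, pvMapF]
      | cons c rest =>
          rw [pvRuns]
          cases h : catOf c with
          | none => simp [pvMapF, h]
          | some k =>
              dsimp only
              have hsplit : rest.takeWhile (fun c' => catOf c' == some k)
                  ++ rest.dropWhile (fun c' => catOf c' == some k) = rest :=
                List.takeWhile_append_dropWhile
              have hrun : ∀ c' ∈ rest.takeWhile (fun c' => catOf c' == some k),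
                  catOf c' = some k := by
                intro c' hc'
                have := List.mem_takeWhile_imp hc'
                exact eq_of_beq (by simpa using this)
              have htail : (rest.dropWhile (fun c' => catOf c' == some k)).length ≤ n := by
                have := List.length_dropWhile_le (fun c' => catOf c' == some k) rest
                simp only [List.length_cons] at hl
                omega
              rw [ih _ htail]
              have hrest : pvMapF catOf rest
                  = (pvMapF catOf (rest.dropWhile (fun c' => catOf c' == some k))).map
                      (fun o => (List.replicate (rest.takeWhile (fun c' => catOf c' == some k)).length k.toList).flatten ++ o) := by
                conv_lhs => rw [← hsplit]
                exact run_emit catOf k _ hrun _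
              simp only [pvMapF, h, Option.bind_some, hrest]
              cases pvMapF catOf (rest.dropWhile (fun c' => catOf c' == some k)) <;>
                simp [List.replicate_succ]

theorem ports_agree (category : List (String × String)) (seq : String) :
    map_seq_to_category category seq = map_seq_to_category_alt category seq := by
  unfold map_seq_to_category map_seq_to_category_alt
  dsimp only
  set d := PySem.Dict.ofList category
  set k1 := PySem.List.pyGetD d.keys 0 ""
  set k2 := PySem.List.pyGetD d.keys 1 ""
  set g1 := d.getD k1 ""
  set g2 := d.getD k2 ""
  have hstep : (fun (acc : Option (List Char)) base =>
      acc.bind fun a =>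
        if PySem.Chars.isIn [base] g1.toList then some (a ++ k1.toList)
        else if PySem.Chars.isIn [base] g2.toList then some (a ++ k2.toList)
        else none)
      = (fun (acc : Option (List Char)) base =>
      acc.bind fun a => (pvCatOf g1.toList g2.toList k1 k2 base).map (fun k => a ++ k.toList)) := by
    funext acc base
    cases acc with
    | none => rfl
    | some a => unfold pvCatOf; split_ifs <;> rfl
  rw [hstep, foldlA, runs_eq _ seq.toList.length _ le_rfl]
  cases pvMapF (pvCatOf g1.toList g2.toList k1 k2) seq.toList <;> rfl

-- ===== VERDICT (by name: the statement is the Claim_ definition above) =====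
theorem map_seq_to_category_spec : Claim_equal_map_seq_to_category := by
  intro category seq _ _
  unfold Spec_map_seq_to_category
  exact ports_agree category seq
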